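-- pv_equiv track=rewrite | github.com/YauhenVadeika/CodewarsTasks | Task 205 Don't give me five!/Don't give me five!.py | all_but_fives
-- ===== SOURCE A (Python) =====
-- def all_but_fives(i):
--     """ Mathematical alternative to the common solution for this Kata. Slightly more efficient. """
--     position = abs(i)
--     while position != 0:
--         figure = position % 10
--         if figure == 5:
--             return False
--         position = position // 10
--     return True
-- ===== SOURCE B (Python) =====
-- def all_but_fives(i):
--     return '5' not in str(abs(i))
-- ===== Notes on version B (the rewrite author's own statement) =====
-- stated objective: idiomatic
-- what changed: Replaces the arithmetic digit-peeling while-loop (% 10 / // 10) with a single substring membership test '5' not in str(abs(i)) on the decimal string.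
import Mathlib
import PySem

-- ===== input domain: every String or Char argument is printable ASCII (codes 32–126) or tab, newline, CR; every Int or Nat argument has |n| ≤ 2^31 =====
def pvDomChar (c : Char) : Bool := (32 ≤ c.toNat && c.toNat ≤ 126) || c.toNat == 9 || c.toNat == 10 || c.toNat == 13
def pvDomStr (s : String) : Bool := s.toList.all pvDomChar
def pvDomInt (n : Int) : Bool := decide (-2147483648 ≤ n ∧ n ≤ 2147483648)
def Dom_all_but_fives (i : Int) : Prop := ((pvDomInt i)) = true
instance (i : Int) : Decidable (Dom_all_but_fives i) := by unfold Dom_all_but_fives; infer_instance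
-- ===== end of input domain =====

-- B replaces A's arithmetic digit-peeling loop with a substring test on str(abs(i)); idiomatic, same cost.

-- ===== PORT A =====
-- A's while-loop over position = abs(i), peeling digits with % 10 and // 10.
-- position is a nonnegative integer throughout, so the loop state is a Nat (i.natAbs = abs(i)).
def allButFivesLoop (position : Nat) : Bool :=
  if position = 0 then true
  else
    let figure := position % 10
    if figure = 5 then false
    else allButFivesLoop (position / 10)
decreasing_by exact Nat.div_lt_self (Nat.pos_of_ne_zero (by assumption)) (by omega)

def all_but_fives (i : Int) : Bool := allButFivesLoop i.natAbs

-- ===== PORT B =====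
-- B: '5' not in str(abs(i))
def all_but_fives_alt (i : Int) : Bool :=
  !(PySem.Str.isIn "5" (PySem.Int.toStr (if i < 0 then -i else i)))

-- ===== PRECONDITION & SPEC =====
def Spec_all_but_fives (i : Int) (out : Bool) : Prop := out = all_but_fives_alt i
instance (i : Int) (out : Bool) : Decidable (Spec_all_but_fives i out) := by unfold Spec_all_but_fives; infer_instance

-- ===== CLAIM (what is proved, stated in full; the proofs are below) =====
def Claim_equal_all_but_fives : Prop := ∀ (i : Int), Dom_all_but_fives i → Spec_all_but_fives i (all_but_fives i)

-- ===== LEMMAS AND PROOFS =====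

theorem five_eq_digitChar_iff (m : Nat) (hm : m < 10) : ('5' = Nat.digitChar m) ↔ m = 5 := by
  interval_cases m <;> simp [Nat.digitChar]

theorem mem_toDigitsCore_iff (fuel : Nat) :
    ∀ (n : Nat) (acc : List Char), n < fuel →
      ('5' ∈ Nat.toDigitsCore 10 fuel n acc ↔ '5' ∈ acc ∨ allButFivesLoop n = false) := by
  induction fuel with
  | zero => intro n acc h; omega
  | succ f ih =>
    intro n acc hn
    rw [Nat.toDigitsCore]
    have hL0 : allButFivesLoop 0 = true := by rw [allButFivesLoop]; simp
    by_cases h0 : n / 10 = 0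
    · rw [if_pos h0, allButFivesLoop]
      by_cases hz : n = 0
      · subst hz
        rw [if_pos rfl, List.mem_cons, five_eq_digitChar_iff (0 % 10) (by omega)]
        simp
      · rw [if_neg hz, h0, hL0, List.mem_cons, five_eq_digitChar_iff (n % 10) (by omega)]
        by_cases h5 : n % 10 = 5 <;> simp [h5]
    · have hlt : n / 10 < f := by
        have : n / 10 < n := Nat.div_lt_self (by omega) (by omega)
        omega
      rw [if_neg h0, allButFivesLoop, if_neg (by omega : ¬ n = 0),
          ih (n / 10) _ hlt, List.mem_cons, five_eq_digitChar_iff (n % 10) (by omega)]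
      by_cases h5 : n % 10 = 5 <;> simp [h5]

theorem mem_toDigits_iff (n : Nat) :
    '5' ∈ Nat.toDigits 10 n ↔ allButFivesLoop n = false := by
  rw [Nat.toDigits, mem_toDigitsCore_iff (n + 1) n [] (by omega)]
  simp

theorem singleton_infix_iff (c : Char) (l : List Char) : [c] <:+: l ↔ c ∈ l := by
  constructor
  · rintro ⟨s, t, rfl⟩; simp
  · intro h
    obtain ⟨s, t, rfl⟩ := List.append_of_mem h
    exact ⟨s, t, by simp⟩

-- ===== VERDICT (by name: the statement is the Claim_ definition above) =====
theorem all_but_fives_spec : Claim_equal_all_but_fives := by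
  intro i _
  unfold Spec_all_but_fives all_but_fives all_but_fives_alt
  have habs : (if i < 0 then -i else i) = (i.natAbs : Int) := by split <;> omega
  have hnn : ¬ ((i.natAbs : Int) < 0) := by omega
  rw [habs, PySem.Str.isIn, PySem.Int.toStr, PySem.Int.toChars, if_neg hnn, Int.toNat_natCast,
      String.toList_ofList]
  rw [String.toList_ofList]
  by_cases h : '5' ∈ Nat.toDigits 10 i.natAbs
  · have hf : allButFivesLoop i.natAbs = false := (mem_toDigits_iff _).mp h
    have hin : PySem.Chars.isIn ['5'] (Nat.toDigits 10 i.natAbs) = true :=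
      (PySem.Chars.isIn_iff_infix _ _).mpr ((singleton_infix_iff _ _).mpr h)
    rw [hf, hin]; rfl
  · have hf : allButFivesLoop i.natAbs = true := by
      by_contra hc
      exact h ((mem_toDigits_iff _).mpr (by simpa using hc))
    have hin : PySem.Chars.isIn ['5'] (Nat.toDigits 10 i.natAbs) = false :=
      (PySem.Chars.isIn_eq_false_iff _ _).mpr (fun hi => h ((singleton_infix_iff _ _).mp hi))
    rw [hf, hin]; rfl
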